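-- pv_equiv track=rewrite | github.com/f-bandet/ISTA-131 | hw1.py | dups_dict
-- ===== SOURCE A (Python) =====
-- def dups_dict(dict2):
--     '''
--     Parameter is dict2, a dictionary that maps keys to lists of values. Return True if any values in
--     the lists occur more than once anywhere in the lists; False otherwise.
--     '''
--     values = []
--     for lists in dict2.values():
--         for value in lists:
--             if value in values:
--                 return True
--             else:
--                 values.append(value)
--     return False
-- ===== SOURCE B (Python) =====
-- def dups_dict(dict2):
--     flat = [v for lst in dict2.values() for v in lst]
--     return len(flat) != len(set(flat))
-- ===== Notes on version B (the rewrite author's own statement) =====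
-- stated objective: simpler
-- what changed: Replaces the incremental seen-list membership scan with early return by flattening all value lists once and comparing the flat list's length with its set's cardinality.
import Mathlib
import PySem

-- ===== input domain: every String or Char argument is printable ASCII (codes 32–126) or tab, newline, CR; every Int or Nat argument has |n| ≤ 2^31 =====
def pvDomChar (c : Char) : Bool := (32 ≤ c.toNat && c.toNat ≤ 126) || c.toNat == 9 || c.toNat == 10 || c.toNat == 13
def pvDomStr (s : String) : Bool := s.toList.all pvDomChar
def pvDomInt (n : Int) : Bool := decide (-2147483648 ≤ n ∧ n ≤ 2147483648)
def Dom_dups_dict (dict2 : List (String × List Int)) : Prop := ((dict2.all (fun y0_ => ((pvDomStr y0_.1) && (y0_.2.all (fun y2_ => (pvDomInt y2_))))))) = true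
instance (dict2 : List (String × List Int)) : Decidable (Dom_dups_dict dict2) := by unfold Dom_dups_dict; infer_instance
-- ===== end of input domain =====

-- ===== PORT A =====
-- B flattens all value lists and compares list length with set cardinality; A scans with a
-- maintained seen-list and early return. Header: equal return values on all inputs (A is total).

-- inner loop of A: 'for value in lists: if value in values: return True else append';
-- none = early 'return True', some seen' = fell through with the updated seen list
def dupsInnerA (seen : List Int) : List Int → Option (List Int)
  | [] => some seen
  | v :: rest => if seen.contains v then none else dupsInnerA (seen ++ [v]) rest

-- outer loop over dict2.values()
def dupsOuterA (seen : List Int) : List (String × List Int) → Bool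
  | [] => false
  | (_, lst) :: rest =>
    match dupsInnerA seen lst with
    | none => true
    | some seen' => dupsOuterA seen' rest

def dups_dict (dict2 : List (String × List Int)) : Bool :=
  dupsOuterA [] dict2

-- ===== PORT B =====
def dups_dict_alt (dict2 : List (String × List Int)) : Bool :=
  let flat := dict2.foldl (fun acc p => acc ++ p.2) []   -- [v for lst in dict2.values() for v in lst]
  decide (flat.length ≠ (PySem.Set.ofList flat).length)  -- len(flat) != len(set(flat))

-- ===== PRECONDITION & SPEC =====
def Spec_dups_dict (dict2 : List (String × List Int)) (out : Bool) : Prop := out = dups_dict_alt dict2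
instance (dict2 : List (String × List Int)) (out : Bool) : Decidable (Spec_dups_dict dict2 out) := by unfold Spec_dups_dict; infer_instance

-- ===== CLAIM (what is proved, stated in full; the proofs are below) =====
def Claim_equal_dups_dict : Prop := ∀ (dict2 : List (String × List Int)), Dom_dups_dict dict2 → Spec_dups_dict dict2 (dups_dict dict2)

-- ===== LEMMAS AND PROOFS =====

-- A's inner loop: succeeds with seen ++ lst exactly when that concatenation is duplicate-free
lemma dupsInnerA_spec (lst seen : List Int) (h : seen.Nodup) :
    dupsInnerA seen lst = if (seen ++ lst).Nodup then some (seen ++ lst) else none := by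
  induction lst generalizing seen with
  | nil => simp [dupsInnerA, h]
  | cons v rest ih =>
    simp only [dupsInnerA]
    by_cases hv : v ∈ seen
    · have hnd : ¬ (seen ++ v :: rest).Nodup := fun hn =>
        (List.disjoint_of_nodup_append hn) hv List.mem_cons_self
      simp [hv, hnd]
    · have hseen' : (seen ++ [v]).Nodup := by
        simp [List.nodup_append, h]
        exact fun a ha hav => hv (hav ▸ ha)
      rw [if_neg (by simpa using hv), ih (seen ++ [v]) hseen']
      simp [List.append_assoc]

-- A's outer loop computes "seen ++ flattened rest has a duplicate"
lemma dupsOuterA_spec (rest : List (String × List Int)) (seen : List Int) (h : seen.Nodup) :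
    dupsOuterA seen rest = decide (¬ (seen ++ rest.flatMap (·.2)).Nodup) := by
  induction rest generalizing seen with
  | nil => simp [dupsOuterA, h]
  | cons p tl ih =>
    obtain ⟨k, lst⟩ := p
    simp only [dupsOuterA, dupsInnerA_spec lst seen h, List.flatMap_cons, ← List.append_assoc]
    by_cases hn : (seen ++ lst).Nodup
    · rw [if_pos hn]
      exact ih (seen ++ lst) hn
    · rw [if_neg hn]
      have hnd : ¬ (seen ++ (lst ++ tl.flatMap (·.2))).Nodup := fun hnd =>
        hn ((List.append_assoc seen lst _ ▸ hnd).sublist (List.sublist_append_left _ _))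
      simp [hnd]

-- set(xs) (first occurrences) is a sublist of xs
lemma ofList_sublist_aux (xs : List Int) (s : List Int) :
    (xs.foldl PySem.Set.add s).Sublist (s ++ xs) := by
  induction xs generalizing s with
  | nil => simp
  | cons x tl ih =>
    simp only [List.foldl_cons]
    by_cases hx : x ∈ s
    · have hadd : PySem.Set.add s x = s := by simp [PySem.Set.add, hx]
      rw [hadd]
      exact (ih s).trans ((List.append_sublist_append_left _).mpr (List.sublist_cons_self x tl))
    · have hadd : PySem.Set.add s x = s ++ [x] := by simp [PySem.Set.add, hx]
      rw [hadd]
      simpa [List.append_assoc] using ih (s ++ [x])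

-- the cardinality comparison detects duplicates
lemma ofList_length_eq_iff (xs : List Int) :
    (PySem.Set.ofList xs).length = xs.length ↔ xs.Nodup := by
  constructor
  · intro hlen
    have hsub : (PySem.Set.ofList xs).Sublist xs := by
      simpa using ofList_sublist_aux xs []
    rw [← hsub.eq_of_length hlen]
    exact PySem.Set.nodup_ofList xs
  · intro h
    rw [PySem.Set.ofList_eq_self_of_nodup xs h]

-- ===== VERDICT (by name: the statement is the Claim_ definition above) =====
theorem dups_dict_spec : Claim_equal_dups_dict := by
  intro dict2 _
  unfold Spec_dups_dict dups_dict dups_dict_alt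
  rw [dupsOuterA_spec dict2 [] List.nodup_nil]
  have hflat : dict2.foldl (fun acc p => acc ++ p.2) [] = dict2.flatMap (·.2) := by
    simpa using PySem.List.foldl_append_eq_flatMap (·.2) dict2 []
  simp only [hflat, List.nil_append]
  exact decide_eq_decide.mpr
    (not_congr (eq_comm.trans (ofList_length_eq_iff (dict2.flatMap (·.2))))).symm
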